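-- pv_equiv track=rewrite | github.com/OliverMorland/offense_classifier | offense_classifier.py | funnel_category
-- ===== SOURCE A (Python) =====
-- def funnel_category(input_category):
--     dictionary = {
--         'Public Order': ["Alcohol Violation", "Resisting Arrest", "Illicit Business", "Obstructing Justice", "Public Institution Violation"],
--         'Traffic': ["Traffic Driving", "Traffic Vehicle", "Traffic Paperwork"]
--     }
--     for key, categories in dictionary.items():
--         for category in categories:
--             if input_category.lower() == category.lower():
--                 return key
--     return input_category
-- ===== SOURCE B (Python) =====
-- _KNOWN_SUBCATEGORIES = {
--     "alcohol violation", "resisting arrest", "illicit business",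
--     "obstructing justice", "public institution violation",
--     "traffic driving", "traffic vehicle", "traffic paperwork",
-- }
--
--
-- def funnel_category(input_category):
--     low = input_category.lower()
--     if low in _KNOWN_SUBCATEGORIES:
--         # The parent key is derivable from the name itself: exactly the
--         # traffic subcategories start with "traffic".
--         return "Traffic" if low.startswith("traffic") else "Public Order"
--     return input_category
-- ===== Notes on version B (the rewrite author's own statement) =====
-- stated objective: simpler
-- what changed: Instead of scanning a key->subcategory-list table to find which key owns the input, B tests the lowercased input against one flat set of all subcategory names and then derives the parent category from the string itself (the 'traffic' prefix) rather than retrieving a stored key.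
import Mathlib
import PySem

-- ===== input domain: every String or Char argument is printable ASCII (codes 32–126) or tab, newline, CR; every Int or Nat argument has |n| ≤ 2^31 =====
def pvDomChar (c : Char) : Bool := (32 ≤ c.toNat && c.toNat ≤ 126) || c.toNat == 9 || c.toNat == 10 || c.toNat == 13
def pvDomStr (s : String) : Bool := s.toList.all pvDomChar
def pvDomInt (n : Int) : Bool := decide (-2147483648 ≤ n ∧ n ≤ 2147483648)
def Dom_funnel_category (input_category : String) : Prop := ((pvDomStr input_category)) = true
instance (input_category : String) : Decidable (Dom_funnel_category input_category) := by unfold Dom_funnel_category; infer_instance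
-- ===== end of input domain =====

-- B replaces A's per-call scan of the key->subcategory-list table by one flat membership
-- test over all subcategory names plus deriving the parent from the "traffic" prefix.

-- ===== PORT A =====
-- inner loop: 'for category in categories: if input_category.lower() == category.lower(): return key'
def fcInner (input_category key : String) : List String -> Option String
  | [] => none
  | c :: rest =>
    if PySem.Str.lower input_category == PySem.Str.lower c then some key
    else fcInner input_category key rest

-- outer loop: 'for key, categories in dictionary.items(): ...'
def fcOuter (input_category : String) : List (String × List String) -> Option String
  | [] => none
  | (key, categories) :: rest =>
    match fcInner input_category key categories with
    | some r => some r
    | none => fcOuter input_category rest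

def funnel_category (input_category : String) : String :=
  let dictionary : List (String × List String) :=
    [("Public Order", ["Alcohol Violation", "Resisting Arrest", "Illicit Business", "Obstructing Justice", "Public Institution Violation"]),
     ("Traffic", ["Traffic Driving", "Traffic Vehicle", "Traffic Paperwork"])]
  match fcOuter input_category dictionary with
  | some r => r
  | none => input_category

-- ===== PORT B =====
-- _KNOWN_SUBCATEGORIES, a Python set of the eight lowercased subcategory names
def fcKnown : PySem.Set String :=
  PySem.Set.ofList
    ["alcohol violation", "resisting arrest", "illicit business",
     "obstructing justice", "public institution violation",
     "traffic driving", "traffic vehicle", "traffic paperwork"]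

-- if low in _KNOWN_SUBCATEGORIES: return "Traffic" if low.startswith("traffic") else "Public Order"
def funnel_category_alt (input_category : String) : String :=
  let low := PySem.Str.lower input_category
  if fcKnown.contains low then
    if PySem.Str.startswith low "traffic" then "Traffic" else "Public Order"
  else input_category

-- ===== PRECONDITION & SPEC =====
def Spec_funnel_category (input_category : String) (out : String) : Prop := out = funnel_category_alt input_category
instance (input_category : String) (out : String) : Decidable (Spec_funnel_category input_category out) := by unfold Spec_funnel_category; infer_instance

-- ===== CLAIM (what is proved, stated in full; the proofs are below) =====
def Claim_equal_funnel_category : Prop := ∀ (input_category : String), Dom_funnel_category input_category → Spec_funnel_category input_category (funnel_category input_category)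

-- ===== LEMMAS AND PROOFS =====

-- the two programs branch on the same eight values of input_category.lower(): case-split on them
theorem fc_eq (s : String) : funnel_category s = funnel_category_alt s := by
  unfold funnel_category funnel_category_alt fcKnown
  simp only [fcOuter, fcInner,
    show PySem.Str.lower "Alcohol Violation" = "alcohol violation" by decide,
    show PySem.Str.lower "Resisting Arrest" = "resisting arrest" by decide,
    show PySem.Str.lower "Illicit Business" = "illicit business" by decide,
    show PySem.Str.lower "Obstructing Justice" = "obstructing justice" by decide,
    show PySem.Str.lower "Public Institution Violation" = "public institution violation" by decide,
    show PySem.Str.lower "Traffic Driving" = "traffic driving" by decide,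
    show PySem.Str.lower "Traffic Vehicle" = "traffic vehicle" by decide,
    show PySem.Str.lower "Traffic Paperwork" = "traffic paperwork" by decide]
  generalize PySem.Str.lower s = l
  by_cases h1 : l = "alcohol violation"; · subst h1; rfl
  by_cases h2 : l = "resisting arrest"; · subst h2; rfl
  by_cases h3 : l = "illicit business"; · subst h3; rfl
  by_cases h4 : l = "obstructing justice"; · subst h4; rfl
  by_cases h5 : l = "public institution violation"; · subst h5; rfl
  by_cases h6 : l = "traffic driving"; · subst h6; rfl
  by_cases h7 : l = "traffic vehicle"; · subst h7; rfl
  by_cases h8 : l = "traffic paperwork"; · subst h8; rfl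
  -- no match: A falls through to input_category, and l is not in the flat set
  have hc : (PySem.Set.ofList
      ["alcohol violation", "resisting arrest", "illicit business",
       "obstructing justice", "public institution violation",
       "traffic driving", "traffic vehicle", "traffic paperwork"]).contains l = false := by
    simp [PySem.Set.mem_ofList, h1, h2, h3, h4, h5, h6, h7, h8]
  simp only [beq_iff_eq, h1, h2, h3, h4, h5, h6, h7, h8, if_false, hc, Bool.false_eq_true]

-- ===== VERDICT (by name: the statement is the Claim_ definition above) =====
theorem funnel_category_spec : Claim_equal_funnel_category := by
  intro s _
  exact fc_eq s
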